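-- pv_equiv track=rewrite | github.com/yogvidwankhede/PyGrep | python/pygrep.py | _count_groups
-- ===== SOURCE A (Python) =====
-- def _count_groups(pat: str) -> int:
--     """
--     Count number of capturing groups, ignoring escaped parentheses.
--     """
--     count, i = 0, 0
--     while i < len(pat):
--         if pat[i] == "\\":
--             i += 2
--         elif pat[i] == "(":
--             count += 1
--             i += 1
--         else:
--             i += 1
--     return count
-- ===== SOURCE B (Python) =====
-- import re
--
-- def _count_groups(pat: str) -> int:
--     # Strip each escaped character (backslash + following char, left-to-right),
--     # then count the remaining '(' characters.
--     cleaned = re.sub(r'\\.', '', pat, flags=re.DOTALL)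
--     return cleaned.count('(')
-- ===== Notes on version B (the rewrite author's own statement) =====
-- stated objective: simpler
-- what changed: Replaces the manual index-skip while loop with a preprocess-then-count: a regex deletes every backslash-escaped character, then the remaining '(' are counted.
import Mathlib
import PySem

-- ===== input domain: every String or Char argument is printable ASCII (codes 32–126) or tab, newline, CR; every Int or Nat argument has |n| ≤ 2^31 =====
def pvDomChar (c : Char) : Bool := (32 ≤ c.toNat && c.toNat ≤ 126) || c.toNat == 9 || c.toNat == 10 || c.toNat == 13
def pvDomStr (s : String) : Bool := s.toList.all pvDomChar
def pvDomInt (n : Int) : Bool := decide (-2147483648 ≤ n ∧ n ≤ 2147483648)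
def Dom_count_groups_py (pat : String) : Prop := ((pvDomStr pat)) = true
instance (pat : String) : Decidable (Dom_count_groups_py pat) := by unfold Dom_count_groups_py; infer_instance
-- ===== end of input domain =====

-- B replaces A's manual index-skip scan with "delete every escaped char, then count '('" (simpler; same cost).
-- ===== PORT A =====
-- the while loop of A: i walks the char list, skipping one extra char after '\\', counting '('
def pvALoop : List Char → Int → Int
  | [], count => count
  | c :: rest, count =>
    if c = '\\' then pvALoop (rest.drop 1) count
    else if c = '(' then pvALoop rest (count + 1)
    else pvALoop rest count
termination_by l _ => l.length
decreasing_by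
  · simp
  · simp
  · simp

def count_groups_py (pat : String) : Int := pvALoop pat.toList 0

-- ===== PORT B =====
-- hand port of re.sub(r'\\.', '', pat, flags=re.DOTALL): delete each backslash with its following
-- char, left-to-right non-overlapping; a lone trailing backslash is left untouched (exact)
def pvCleanEsc : List Char → List Char
  | [] => []
  | [c] => [c]
  | c :: d :: rest => if c = '\\' then pvCleanEsc rest else c :: pvCleanEsc (d :: rest)

-- cleaned.count('(')
def count_groups_py_alt (pat : String) : Int := PySem.List.count (pvCleanEsc pat.toList) '(' 

-- ===== PRECONDITION & SPEC =====
def Spec_count_groups_py (pat : String) (out : Int) : Prop := out = count_groups_py_alt pat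
instance (pat : String) (out : Int) : Decidable (Spec_count_groups_py pat out) := by unfold Spec_count_groups_py; infer_instance

-- ===== CLAIM (what is proved, stated in full; the proofs are below) =====
def Claim_equal_count_groups_py : Prop := ∀ (pat : String), Dom_count_groups_py pat → Spec_count_groups_py pat (count_groups_py pat)

-- ===== LEMMAS AND PROOFS =====

-- ===== VERDICT (by name: the statement is the Claim_ definition above) =====
-- loop invariant: the accumulator adds to the count of '(' in the cleaned remainder
theorem pvALoop_eq : ∀ (n : Nat) (l : List Char), l.length ≤ n → ∀ c : Int,
    pvALoop l c = c + PySem.List.count (pvCleanEsc l) '(' := by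
  intro n
  induction n with
  | zero =>
    intro l h c
    have : l = [] := List.eq_nil_of_length_eq_zero (Nat.le_zero.mp h)
    simp [this, pvALoop, pvCleanEsc, PySem.List.count]
  | succ n ih =>
    intro l h c
    match l with
    | [] => simp [pvALoop, pvCleanEsc, PySem.List.count]
    | [x] =>
      by_cases hb : x = '\\' <;> by_cases hp : x = '(' <;>
        simp_all [pvALoop, pvCleanEsc, PySem.List.count]
    | x :: d :: rest =>
      have hlen : rest.length + 2 ≤ n + 1 := by simpa using h
      have h1 : rest.length ≤ n := by omega
      have h2 : (d :: rest).length ≤ n := by simpa using by omega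
      by_cases hb : x = '\\'
      · simp [pvALoop, pvCleanEsc, hb, ih rest h1 c]
      · by_cases hp : x = '('
        · have hih := ih (d :: rest) h2 (c + 1)
          simp [pvALoop, pvCleanEsc, hp, hih, PySem.List.count]
          ring
        · have hih := ih (d :: rest) h2 c
          simp [pvALoop, pvCleanEsc, hb, hp, hih, PySem.List.count]

theorem count_groups_py_spec : Claim_equal_count_groups_py := by
  intro pat _
  unfold Spec_count_groups_py count_groups_py count_groups_py_alt
  simpa using pvALoop_eq pat.toList.length pat.toList le_rfl 0
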